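-- pv_equiv track=rewrite | github.com/lgastako/pygatsby | main.py | top_k_to_context_with_restrictions
-- ===== SOURCE A (Python) =====
-- def top_k_to_context_with_restrictions(max_length, top_k):
--     result = "<history not available>"
--     for n in range(len(top_k)):
--         contextified = top_k_to_context(top_k)
--         if len(contextified) <= max_length:
--             result = contextified
--             break
--         top_k = top_k[1:]  # TODO is this right or do we want -1?
--     return result
--
-- def top_k_to_context(top_k):
--     return "\n\n".join(top_k)
-- ===== SOURCE B (Python) =====
-- def top_k_to_context_with_restrictions(max_length, top_k):
--     # One pass: precompute the joined length of the whole list, then walk the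
--     # suffixes subtracting len(item)+2, joining only the suffix that fits.
--     n = len(top_k)
--     lens = [len(s) for s in top_k]
--     total = sum(lens) + 2 * (n - 1)
--     for i in range(n):
--         if total <= max_length:
--             return "\n\n".join(top_k[i:])
--         total -= lens[i] + 2
--     return "<history not available>"
-- ===== Notes on version B (the rewrite author's own statement) =====
-- stated objective: faster
-- what changed: Instead of re-joining the whole suffix on every iteration, B computes the joined length once and updates it by subtraction while scanning for the first suffix that fits, performing a single join at the end.
import Mathlib
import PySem

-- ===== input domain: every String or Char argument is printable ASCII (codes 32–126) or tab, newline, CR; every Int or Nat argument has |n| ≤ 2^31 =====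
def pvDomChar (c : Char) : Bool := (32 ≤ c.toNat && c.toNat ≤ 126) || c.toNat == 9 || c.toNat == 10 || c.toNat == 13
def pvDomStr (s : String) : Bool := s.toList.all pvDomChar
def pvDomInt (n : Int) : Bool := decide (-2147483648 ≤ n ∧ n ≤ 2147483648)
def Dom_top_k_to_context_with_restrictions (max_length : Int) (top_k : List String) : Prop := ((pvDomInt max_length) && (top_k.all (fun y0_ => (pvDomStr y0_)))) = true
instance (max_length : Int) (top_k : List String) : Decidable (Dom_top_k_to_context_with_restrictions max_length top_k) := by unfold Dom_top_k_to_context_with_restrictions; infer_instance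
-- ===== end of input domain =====

-- B avoids re-joining every suffix: it tracks the joined length by subtraction and joins once (faster).

-- ===== PORT A =====
-- top_k_to_context(top_k) = "\n\n".join(top_k)
def top_k_to_context (top_k : List String) : String := PySem.Str.join "\n\n" top_k

-- the for-loop of A: fuel = range(len(top_k)), top_k shrinks via top_k[1:]
def pvAloop (max_length : Int) : Nat → List String → String
  | 0, _ => "<history not available>"
  | n + 1, tk =>
    let contextified := top_k_to_context tk
    if PySem.Str.len contextified ≤ max_length then contextified
    else pvAloop max_length n (PySem.List.slice tk (some 1) none)

def top_k_to_context_with_restrictions (max_length : Int) (top_k : List String) : String :=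
  pvAloop max_length top_k.length top_k

-- ===== PORT B =====
-- the scan of B: `total` is the joined length of the current suffix; join only the fitting one
def pvBloop (max_length : Int) : Int → List String → String
  | _, [] => "<history not available>"
  | total, s :: rest =>
    if total ≤ max_length then PySem.Str.join "\n\n" (s :: rest)
    else pvBloop max_length (total - PySem.Str.len s - 2) rest

def top_k_to_context_with_restrictions_alt (max_length : Int) (top_k : List String) : String :=
  let lens := top_k.map PySem.Str.len
  let total := lens.sum + 2 * ((top_k.length : Int) - 1)
  pvBloop max_length total top_k

-- ===== PRECONDITION & SPEC =====
def Spec_top_k_to_context_with_restrictions (max_length : Int) (top_k : List String) (out : String) : Prop := out = top_k_to_context_with_restrictions_alt max_length top_k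
instance (max_length : Int) (top_k : List String) (out : String) : Decidable (Spec_top_k_to_context_with_restrictions max_length top_k out) := by unfold Spec_top_k_to_context_with_restrictions; infer_instance

-- ===== CLAIM (what is proved, stated in full; the proofs are below) =====
def Claim_equal_top_k_to_context_with_restrictions : Prop := ∀ (max_length : Int) (top_k : List String), Dom_top_k_to_context_with_restrictions max_length top_k → Spec_top_k_to_context_with_restrictions max_length top_k (top_k_to_context_with_restrictions max_length top_k)

-- ===== LEMMAS AND PROOFS =====

-- joined length of a list of strings
def pvJL (tk : List String) : Int := PySem.Str.len (PySem.Str.join "\n\n" tk)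

theorem pvJL_cons_cons (s t : String) (r : List String) :
    pvJL (s :: t :: r) = PySem.Str.len s + 2 + pvJL (t :: r) := by
  simp [pvJL, PySem.Str.len_eq, PySem.Str.toList_join, PySem.Chars.join_cons_cons]
  ring

theorem pvJL_eq_total (tk : List String) (h : tk ≠ []) :
    pvJL tk = (tk.map PySem.Str.len).sum + 2 * ((tk.length : Int) - 1) := by
  induction tk with
  | nil => exact absurd rfl h
  | cons s rest ih =>
    cases rest with
    | nil =>
      simp [pvJL, PySem.Str.len_eq, PySem.Str.toList_join, PySem.Chars.join_singleton]
    | cons t r =>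
      rw [pvJL_cons_cons, ih (by simp)]
      simp [List.map_cons]
      ring

theorem pvLoop_eq (max_length : Int) (tk : List String) :
    pvAloop max_length tk.length tk = pvBloop max_length (pvJL tk) tk := by
  induction tk with
  | nil => simp [pvAloop, pvBloop]
  | cons s rest ih =>
    show pvAloop max_length (rest.length + 1) (s :: rest) = _
    rw [pvAloop, pvBloop]
    simp only [top_k_to_context, PySem.List.slice_from_one, List.tail_cons]
    unfold pvJL
    split_ifs with h
    · rfl
    · cases rest with
      | nil => simp [pvAloop, pvBloop]
      | cons t r =>
        rw [ih]
        congr 1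
        have h2 := pvJL_cons_cons s t r
        simp only [pvJL] at h2 ⊢
        omega

-- ===== VERDICT (by name: the statement is the Claim_ definition above) =====
theorem top_k_to_context_with_restrictions_spec : Claim_equal_top_k_to_context_with_restrictions := by
  intro max_length top_k _
  unfold Spec_top_k_to_context_with_restrictions
  unfold top_k_to_context_with_restrictions top_k_to_context_with_restrictions_alt
  rw [pvLoop_eq]
  cases top_k with
  | nil => simp [pvBloop]
  | cons s rest =>
    congr 1
    exact pvJL_eq_total (s :: rest) (by simp)
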